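-- pv_equiv track=rewrite | github.com/aphoticshaman/HungryOrca | orca_ultimate_hybrid.py | scale_up_2x
-- ===== SOURCE A (Python) =====
-- def scale_up_2x(g):
--     """Scale up by 2x (each cell becomes 2x2)"""
--     result = []
--     for row in g:
--         new_row1 = []
--         new_row2 = []
--         for cell in row:
--             new_row1.extend([cell, cell])
--             new_row2.extend([cell, cell])
--         result.append(new_row1)
--         result.append(new_row2)
--     return result
-- ===== SOURCE B (Python) =====
-- def scale_up_2x(g):
--     """Scale up by 2x (each cell becomes 2x2)"""
--     return [[g[i // 2][j // 2] for j in range(2 * len(g[i // 2]))]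
--             for i in range(2 * len(g))]
-- ===== Notes on version B (the rewrite author's own statement) =====
-- stated objective: alternative
-- what changed: Replaces A's element/row duplication via extend/append with a closed-form index-arithmetic construction: out[i][j] = g[i//2][j//2] over ranges of doubled size.
import Mathlib
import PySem

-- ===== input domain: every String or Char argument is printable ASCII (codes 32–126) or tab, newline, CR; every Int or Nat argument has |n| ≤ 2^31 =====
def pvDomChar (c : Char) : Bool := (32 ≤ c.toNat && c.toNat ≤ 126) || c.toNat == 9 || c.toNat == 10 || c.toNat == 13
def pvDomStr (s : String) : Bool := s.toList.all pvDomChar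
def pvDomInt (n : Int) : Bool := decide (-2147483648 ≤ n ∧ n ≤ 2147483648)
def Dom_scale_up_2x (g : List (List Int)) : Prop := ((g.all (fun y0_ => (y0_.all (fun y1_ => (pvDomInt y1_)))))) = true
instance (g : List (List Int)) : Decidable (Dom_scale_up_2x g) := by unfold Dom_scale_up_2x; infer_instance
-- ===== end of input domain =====

-- B replaces A's element/row duplication loops with an index-arithmetic construction out[i][j] = g[i//2][j//2] (alternative decomposition, same cost).


-- ===== PORT A =====
-- for each row, build new_row1 and new_row2 cell by cell (extend with [cell, cell]), then append both to result
def scale_up_2x (g : List (List Int)) : List (List Int) :=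
  g.foldl (fun result row =>
    let rows := row.foldl (fun (p : List Int × List Int) cell =>
      (p.1 ++ [cell, cell], p.2 ++ [cell, cell])) ([], [])
    (result ++ [rows.1]) ++ [rows.2]) []

-- ===== PORT B =====
-- out[i][j] = g[i//2][j//2] over ranges of doubled size; all indices are nonnegative and in range,
-- so Nat division and getD are exact for Python's // and list indexing here
def scale_up_2x_alt (g : List (List Int)) : List (List Int) :=
  (List.range (2 * g.length)).map (fun i =>
    (List.range (2 * (g.getD (i / 2) []).length)).map (fun j =>
      (g.getD (i / 2) []).getD (j / 2) 0))

-- ===== PRECONDITION & SPEC =====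
def Spec_scale_up_2x (g : List (List Int)) (out : List (List Int)) : Prop := out = scale_up_2x_alt g
instance (g : List (List Int)) (out : List (List Int)) : Decidable (Spec_scale_up_2x g out) := by unfold Spec_scale_up_2x; infer_instance

-- ===== CLAIM (what is proved, stated in full; the proofs are below) =====
def Claim_equal_scale_up_2x : Prop := ∀ (g : List (List Int)), Dom_scale_up_2x g → Spec_scale_up_2x g (scale_up_2x g)

-- ===== LEMMAS AND PROOFS =====
-- generic: a doubled-range map with halved index is the doubled flatMap
theorem range_double_map {α : Type} (h : Nat → α) (n : Nat) :
    (List.range (2 * n)).map (fun i => h (i / 2))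
      = (List.range n).flatMap (fun k => [h k, h k]) := by
  induction n with
  | zero => rfl
  | succ m ih =>
    have : 2 * (m + 1) = (2 * m) + 1 + 1 := by ring
    rw [this, List.range_succ, List.range_succ, List.range_succ]
    simp only [List.map_append, List.flatMap_append, ih, List.map_cons, List.map_nil,
      List.flatMap_cons, List.flatMap_nil]
    have h1 : (2 * m) / 2 = m := by omega
    have h2 : (2 * m + 1) / 2 = m := by omega
    simp [h1, h2, List.append_assoc]

-- indexing a list through range of its length is mapping
theorem range_getD_map {α β : Type} (f : α → β) (d : α) (xs : List α) :
    (List.range xs.length).map (fun k => f (xs.getD k d)) = xs.map f := by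
  induction xs with
  | nil => rfl
  | cons x t ih =>
    rw [List.length_cons, List.range_succ_eq_map]
    simp only [List.map_cons, List.map_map]
    exact congrArg (f x :: ·) (ih)

-- B's inner row equals the widened row
theorem alt_inner (row : List Int) :
    (List.range (2 * row.length)).map (fun j => row.getD (j / 2) 0)
      = row.flatMap (fun c => [c, c]) := by
  rw [range_double_map (fun k => row.getD k 0)]
  have := range_getD_map (fun c : Int => [c, c]) 0 row
  calc (List.range row.length).flatMap (fun k => [row.getD k 0, row.getD k 0])
      = ((List.range row.length).map (fun k => [row.getD k 0, row.getD k 0])).flatten := by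
        simp [List.flatMap_def]
    _ = (row.map (fun c => [c, c])).flatten := by rw [this]
    _ = row.flatMap (fun c => [c, c]) := List.flatMap_def.symm

-- B in flatMap form
theorem alt_eq (g : List (List Int)) :
    scale_up_2x_alt g
      = g.flatMap (fun row => [row.flatMap (fun c => [c, c]), row.flatMap (fun c => [c, c])]) := by
  unfold scale_up_2x_alt
  have step : (List.range (2 * g.length)).map (fun i =>
      (List.range (2 * (g.getD (i / 2) []).length)).map (fun j => (g.getD (i / 2) []).getD (j / 2) 0))
      = (List.range (2 * g.length)).map (fun i => (g.getD (i / 2) []).flatMap (fun c => [c, c])) := by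
    apply List.map_congr_left; intro i _; exact alt_inner _
  rw [step, range_double_map (fun k => (g.getD k []).flatMap (fun c => [c, c]))]
  have h2 := range_getD_map
    (fun row : List Int => [row.flatMap (fun c => [c, c]), row.flatMap (fun c => [c, c])]) [] g
  calc (List.range g.length).flatMap
        (fun k => [(g.getD k []).flatMap (fun c => [c, c]), (g.getD k []).flatMap (fun c => [c, c])])
      = ((List.range g.length).map
          (fun k => [(g.getD k []).flatMap (fun c => [c, c]), (g.getD k []).flatMap (fun c => [c, c])])).flatten := by
        simp [List.flatMap_def]
    _ = (g.map (fun row => [row.flatMap (fun c => [c, c]), row.flatMap (fun c => [c, c])])).flatten := by rw [h2]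
    _ = _ := List.flatMap_def.symm

-- A's inner loop computes the widened row twice
theorem inner_loop_eq (row : List Int) (a b : List Int) :
    row.foldl (fun (p : List Int × List Int) cell =>
      (p.1 ++ [cell, cell], p.2 ++ [cell, cell])) (a, b)
    = (a ++ row.flatMap (fun cell => [cell, cell]),
       b ++ row.flatMap (fun cell => [cell, cell])) := by
  induction row generalizing a b with
  | nil => simp
  | cons c t ih => simp [List.foldl, ih, List.append_assoc]

-- A in flatMap form
theorem a_eq (g : List (List Int)) (acc : List (List Int)) :
    g.foldl (fun result row =>
      let rows := row.foldl (fun (p : List Int × List Int) cell =>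
        (p.1 ++ [cell, cell], p.2 ++ [cell, cell])) ([], [])
      (result ++ [rows.1]) ++ [rows.2]) acc
    = acc ++ g.flatMap (fun row => [row.flatMap (fun c => [c, c]), row.flatMap (fun c => [c, c])]) := by
  induction g generalizing acc with
  | nil => simp
  | cons r t ih =>
    simp only [List.foldl_cons, List.flatMap_cons]
    rw [inner_loop_eq]
    simp only [List.nil_append]
    rw [ih]
    simp [List.append_assoc]

-- ===== VERDICT (by name: the statement is the Claim_ definition above) =====
theorem scale_up_2x_spec : Claim_equal_scale_up_2x := by
  intro g _
  unfold Spec_scale_up_2x scale_up_2x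
  rw [alt_eq, a_eq]
  simp
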